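-- pv_equiv track=rewrite | github.com/cgtygrss/object-measurer | Logic/ImageOperations/MeasureObject.py | get_vertical_intersection_coords
-- ===== SOURCE A (Python) =====
-- def get_vertical_intersection_coords(coords, distinct_x_intersections):
--     vertical_intersection_coords = list()
--     for j in distinct_x_intersections:
--         distinct_x_coords = list()
--         for i in coords:
--             if i not in distinct_x_coords and i[1] == j:
--                 distinct_x_coords.append(i)
--         vertical_intersection_coords.append(distinct_x_coords)
--     return vertical_intersection_coords
-- ===== SOURCE B (Python) =====
-- def get_vertical_intersection_coords(coords, distinct_x_intersections):
--     groups = {}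
--     for c in coords:
--         g = groups.setdefault(c[1], [])
--         if c not in g:
--             g.append(c)
--     return [list(groups.get(j, [])) for j in distinct_x_intersections]
-- ===== Notes on version B (the rewrite author's own statement) =====
-- stated objective: faster
-- what changed: B builds a dict grouping coords by their second component in one pass (deduplicating within each group) and then answers each intersection value by a single dict lookup, instead of A's full rescan of coords for every intersection value.
import Mathlib
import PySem

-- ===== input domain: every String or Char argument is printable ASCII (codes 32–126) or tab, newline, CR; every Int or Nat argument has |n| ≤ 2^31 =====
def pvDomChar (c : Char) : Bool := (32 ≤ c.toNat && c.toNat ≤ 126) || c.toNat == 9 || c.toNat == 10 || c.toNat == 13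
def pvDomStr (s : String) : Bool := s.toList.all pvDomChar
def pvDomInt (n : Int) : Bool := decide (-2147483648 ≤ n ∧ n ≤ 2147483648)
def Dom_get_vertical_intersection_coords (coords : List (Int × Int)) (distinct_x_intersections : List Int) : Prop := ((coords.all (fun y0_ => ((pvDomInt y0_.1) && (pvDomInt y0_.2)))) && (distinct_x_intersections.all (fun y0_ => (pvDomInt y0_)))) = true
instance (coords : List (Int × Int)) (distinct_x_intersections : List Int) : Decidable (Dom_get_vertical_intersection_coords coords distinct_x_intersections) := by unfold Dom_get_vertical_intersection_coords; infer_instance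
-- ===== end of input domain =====

-- B replaces A's rescan of coords for every intersection value by one grouping
-- pass over coords into a dict keyed by the second component, then one lookup per value.

-- ===== PORT A =====
def get_vertical_intersection_coords (coords : List (Int × Int)) (distinct_x_intersections : List Int) : List (List (Int × Int)) :=
  distinct_x_intersections.foldl (fun acc j =>
    acc ++ [coords.foldl (fun d i =>
      if !d.contains i && i.2 == j then d ++ [i] else d) []]) []

-- ===== PORT B =====
def get_vertical_intersection_coords_alt (coords : List (Int × Int)) (distinct_x_intersections : List Int) : List (List (Int × Int)) :=
  let groups : PySem.Dict Int (List (Int × Int)) :=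
    coords.foldl (fun g c =>
      let cur := g.getD c.2 []            -- groups.setdefault(c[1], [])
      if cur.contains c then
        (if g.contains c.2 then g else g.insert c.2 cur)   -- setdefault's insertion when key absent
      else g.insert c.2 (cur ++ [c])) PySem.Dict.empty     -- g.append(c) mutates the dict entry
  distinct_x_intersections.map (fun j => groups.getD j [])

-- ===== PRECONDITION & SPEC =====
def Spec_get_vertical_intersection_coords (coords : List (Int × Int)) (distinct_x_intersections : List Int) (out : List (List (Int × Int))) : Prop := out = get_vertical_intersection_coords_alt coords distinct_x_intersections
instance (coords : List (Int × Int)) (distinct_x_intersections : List Int) (out : List (List (Int × Int))) : Decidable (Spec_get_vertical_intersection_coords coords distinct_x_intersections out) := by unfold Spec_get_vertical_intersection_coords; infer_instance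

-- ===== CLAIM (what is proved, stated in full; the proofs are below) =====
def Claim_equal_get_vertical_intersection_coords : Prop := ∀ (coords : List (Int × Int)) (distinct_x_intersections : List Int), Dom_get_vertical_intersection_coords coords distinct_x_intersections → Spec_get_vertical_intersection_coords coords distinct_x_intersections (get_vertical_intersection_coords coords distinct_x_intersections)

-- ===== LEMMAS AND PROOFS =====

-- A's outer loop is a map over distinct_x_intersections
lemma aOuter_eq_map (dxs : List Int) (f : Int → List (Int × Int)) (acc : List (List (Int × Int))) :
    dxs.foldl (fun a j => a ++ [f j]) acc = acc ++ dxs.map f := by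
  induction dxs generalizing acc with
  | nil => simp
  | cons j rest ih => simp [List.foldl, ih, List.append_assoc]

-- one step of B's grouping fold, as read at key j
lemma bStep_getD (g : PySem.Dict Int (List (Int × Int))) (c : Int × Int) (j : Int) :
    ((let cur := g.getD c.2 []
      if cur.contains c then
        (if g.contains c.2 then g else g.insert c.2 cur)
      else g.insert c.2 (cur ++ [c])) : PySem.Dict Int (List (Int × Int))).getD j []
    = (if !(g.getD j []).contains c && c.2 == j then g.getD j [] ++ [c] else g.getD j []) := by
  by_cases hc : c ∈ g.getD c.2 []
  · by_cases hj : j = c.2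
    · subst hj
      by_cases hk : g.contains c.2 <;> simp [hc, hk]
    · by_cases hk : g.contains c.2 <;>
        simp [hc, hk, PySem.Dict.getD_insert, hj, Ne.symm hj]
  · by_cases hj : j = c.2
    · subst hj; simp [hc]
    · simp [hc, PySem.Dict.getD_insert, hj, Ne.symm hj]

-- B's grouping fold at key j computes A's inner loop over the same coords
lemma bFold_getD (coords : List (Int × Int)) (g : PySem.Dict Int (List (Int × Int))) (j : Int) :
    (coords.foldl (fun g c =>
      let cur := g.getD c.2 []
      if cur.contains c then
        (if g.contains c.2 then g else g.insert c.2 cur)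
      else g.insert c.2 (cur ++ [c])) g).getD j []
    = coords.foldl (fun d i => if !d.contains i && i.2 == j then d ++ [i] else d) (g.getD j []) := by
  induction coords generalizing g with
  | nil => rfl
  | cons c rest ih =>
    simp only [List.foldl]
    rw [ih, bStep_getD]

-- ===== VERDICT (by name: the statement is the Claim_ definition above) =====
theorem get_vertical_intersection_coords_spec : Claim_equal_get_vertical_intersection_coords := by
  intro coords dxs _
  unfold Spec_get_vertical_intersection_coords get_vertical_intersection_coords get_vertical_intersection_coords_alt
  rw [aOuter_eq_map]
  simp only [List.nil_append]
  apply List.map_congr_left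
  intro j _
  rw [bFold_getD]
  rfl
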